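-- pv_equiv track=rewrite | github.com/ThePracticalHow/The_Resolved_Chord | verification/dirac_fold_transition.py | s5_z3_invariant
-- ===== SOURCE A (Python) =====
-- import math
--
-- def s5_z3_invariant(ell):
--     """Number of Z_3-invariant modes at level ell."""
--     total = 0
--     for a in range(ell+1):
--         b = ell - a
--         if (a - b) % 3 == 0:
--             if a >= 1 and b >= 1:
--                 dim = (math.comb(a+2,2) * math.comb(b+2,2) -
--                        math.comb(a+1,2) * math.comb(b+1,2))
--             elif b == 0:
--                 dim = math.comb(a+2, 2)
--             else:
--                 dim = math.comb(b+2, 2)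
--             total += dim
--     return total
-- ===== SOURCE B (Python) =====
-- def s5_z3_invariant(ell):
--     """Number of Z_3-invariant modes at level ell (closed form, no loop)."""
--     if ell < 0:
--         return 0
--     r = (2 * ell) % 3            # smallest a with (a - (ell-a)) % 3 == 0
--     J = (ell - r) // 3           # valid a are r, r+3, ..., r+3J
--     p, q = r + 1, ell - r + 1
--     # 2 * sum_{j=0..J} (p+3j)(q-3j)
--     S2 = 2 * (J + 1) * p * q + 3 * (q - p) * J * (J + 1) - 3 * J * (J + 1) * (2 * J + 1)
--     return (ell + 2) * S2 // 4
-- ===== Notes on version B (the rewrite author's own statement) =====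
-- stated objective: faster
-- what changed: Replaced the linear loop over all levels (testing the congruence and multiplying binomial coefficients per term) by a constant-time closed form: the admissible values of a form an arithmetic progression with common difference three, each term simplifies to half of (a+1)(b+1)(ell+2), and the progression is summed by a cubic polynomial formula.
import Mathlib
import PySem

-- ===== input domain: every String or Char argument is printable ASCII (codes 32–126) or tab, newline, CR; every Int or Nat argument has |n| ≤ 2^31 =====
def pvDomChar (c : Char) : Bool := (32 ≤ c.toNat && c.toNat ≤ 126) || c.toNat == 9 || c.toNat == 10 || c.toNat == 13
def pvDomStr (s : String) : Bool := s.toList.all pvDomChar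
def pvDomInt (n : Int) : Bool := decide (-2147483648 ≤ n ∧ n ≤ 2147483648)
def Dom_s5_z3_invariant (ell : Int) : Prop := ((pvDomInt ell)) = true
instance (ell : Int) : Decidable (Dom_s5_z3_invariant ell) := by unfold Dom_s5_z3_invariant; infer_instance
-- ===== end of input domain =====

-- B replaces A's O(ell) loop by an O(1) closed-form polynomial over the arithmetic progression of admissible modes.

-- ===== PORT A =====
-- math.comb(n, k); exact for n, k ≥ 0, which covers every call site of A
def pyComb (n k : Int) : Int := ((n.toNat).choose k.toNat : Int)

-- the dim computed inside A's loop (branches in A's order)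
def pvDim (a b : Int) : Int :=
  if 1 ≤ a ∧ 1 ≤ b then
    pyComb (a+2) 2 * pyComb (b+2) 2 - pyComb (a+1) 2 * pyComb (b+1) 2
  else if b = 0 then pyComb (a+2) 2
  else pyComb (b+2) 2

-- one iteration of A's loop body
def pvBody (ell total a : Int) : Int :=
  if PySem.Int.mod (a - (ell - a)) 3 = 0 then total + pvDim a (ell - a) else total

def s5_z3_invariant (ell : Int) : Int :=
  (PySem.List.pyRange 0 (ell+1) 1).foldl (pvBody ell) 0

-- ===== PORT B =====
def s5_z3_invariant_alt (ell : Int) : Int :=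
  if ell < 0 then 0
  else
    let r := PySem.Int.mod (2 * ell) 3
    let J := PySem.Int.floordiv (ell - r) 3
    let p := r + 1
    let q := ell - r + 1
    let S2 := 2 * (J + 1) * p * q + 3 * (q - p) * J * (J + 1) - 3 * J * (J + 1) * (2 * J + 1)
    PySem.Int.floordiv ((ell + 2) * S2) 4

-- ===== PRECONDITION & SPEC =====
def Spec_s5_z3_invariant (ell : Int) (out : Int) : Prop := out = s5_z3_invariant_alt ell
instance (ell : Int) (out : Int) : Decidable (Spec_s5_z3_invariant ell out) := by unfold Spec_s5_z3_invariant; infer_instance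

-- ===== CLAIM (what is proved, stated in full; the proofs are below) =====
def Claim_equal_s5_z3_invariant : Prop := ∀ (ell : Int), Dom_s5_z3_invariant ell → Spec_s5_z3_invariant ell (s5_z3_invariant ell)

-- ===== LEMMAS AND PROOFS =====

-- partial sums of A's loop, a < m
def pvPartial (n : Nat) (m : Nat) : Int :=
  (PySem.List.pyRange 0 (m : Int) 1).foldl (pvBody (n : Int)) 0

-- number of admissible a < m (admissible: a ≡ r' [3])
def pvCnt (r' m : Nat) : Nat := (m + 2 - r') / 3

-- closed form for 4 * (partial sum with k admissible terms)
def pvF (n r' : Nat) (k : Int) : Int :=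
  ((n:Int) + 2) * (2 * k * ((r':Int) + 1) * ((n:Int) - (r':Int) + 1)
    + 3 * (((n:Int) - (r':Int) + 1) - ((r':Int) + 1)) * (k - 1) * k
    - 3 * (k - 1) * k * (2 * k - 1))

theorem pv_two_mul_choose_two (t : Nat) : 2 * t.choose 2 = t * (t - 1) := by
  cases t with
  | zero => rfl
  | succ s =>
    rw [Nat.choose_two_right, Nat.mul_div_cancel']
    simpa [Nat.mul_comm] using (Nat.even_mul_succ_self s).two_dvd

theorem pv_comb2 (x : Int) (hx : 0 ≤ x) : 2 * pyComb x 2 = x * (x - 1) := by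
  obtain ⟨t, rfl⟩ := Int.eq_ofNat_of_zero_le hx
  unfold pyComb
  cases t with
  | zero => decide
  | succ s =>
    have h := pv_two_mul_choose_two (s+1)
    simp only [Int.toNat_natCast]
    have h2 : ((2:Int)).toNat = 2 := rfl
    rw [h2]
    push_cast at h ⊢
    linarith

theorem pv_dim4 (a b : Int) (ha : 0 ≤ a) (hb : 0 ≤ b) :
    4 * pvDim a b = 2 * (a + 1) * (b + 1) * (a + b + 2) := by
  unfold pvDim
  have e1 := pv_comb2 (a+2) (by omega)
  have e2 := pv_comb2 (b+2) (by omega)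
  have e3 := pv_comb2 (a+1) (by omega)
  have e4 := pv_comb2 (b+1) (by omega)
  split_ifs with h1 h2
  · have h12 : 4 * (pyComb (a+2) 2 * pyComb (b+2) 2) = (a+2)*(a+1)*((b+2)*(b+1)) := by
      linear_combination (2 * pyComb (b+2) 2) * e1 + ((a+2)*(a+1)) * e2
    have h34 : 4 * (pyComb (a+1) 2 * pyComb (b+1) 2) = (a+1)*a*((b+1)*b) := by
      linear_combination (2 * pyComb (b+1) 2) * e3 + ((a+1)*a) * e4
    linear_combination h12 - h34
  · subst h2; linear_combination 2 * e1
  · have ha0 : a = 0 := by omega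
    subst ha0; linear_combination 2 * e2

theorem pv_partial_eq (n : Nat) : ∀ m : Nat, m ≤ n + 1 →
    4 * pvPartial n m = pvF n ((2*n) % 3) (pvCnt ((2*n) % 3) m) := by
  intro m
  induction m with
  | zero =>
    intro _
    have hnil : PySem.List.pyRange 0 ((0:Nat):Int) 1 = [] :=
      PySem.List.pyRange_one_eq_nil (by simp)
    have hc : pvCnt ((2*n) % 3) 0 = 0 := by unfold pvCnt; omega
    rw [pvPartial, hnil, hc]
    simp only [List.foldl_nil]
    unfold pvF; push_cast; ring
  | succ m ih =>
    intro hm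
    have hm' : m ≤ n := by omega
    have hsplit : PySem.List.pyRange 0 (((m+1:Nat)):Int) 1
        = PySem.List.pyRange 0 ((m:Nat):Int) 1 ++ [((m:Nat):Int)] := by
      push_cast
      exact PySem.List.pyRange_one_succ_right (by positivity)
    rw [pvPartial, hsplit, List.foldl_append]
    have hP : (PySem.List.pyRange 0 ((m:Nat):Int) 1).foldl (pvBody (n:Int)) 0 = pvPartial n m := rfl
    rw [hP]
    by_cases hd : m % 3 = (2*n) % 3
    · have hdvd : PySem.Int.mod (((m:Nat):Int) - ((n:Int) - ((m:Nat):Int))) 3 = 0 := by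
        rw [PySem.Int.mod_eq_zero_iff_dvd]
        omega
      rw [List.foldl_cons, List.foldl_nil]
      unfold pvBody
      rw [if_pos hdvd]
      have hcnt : pvCnt ((2*n) % 3) (m+1) = pvCnt ((2*n) % 3) m + 1 := by unfold pvCnt; omega
      have hmk : ((m:Nat):Int) = (((2*n) % 3 : Nat) : Int) + 3 * ((pvCnt ((2*n) % 3) m : Nat) : Int) := by
        unfold pvCnt; omega
      have hdim := pv_dim4 ((m:Nat):Int) ((n:Int) - ((m:Nat):Int)) (by positivity) (by omega)
      rw [mul_add, ih (by omega), hcnt]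
      have hdim' : 4 * pvDim ((m:Nat):Int) ((n:Int) - ((m:Nat):Int))
          = 2 * (((m:Nat):Int) + 1) * (((n:Int) - ((m:Nat):Int)) + 1) * ((n:Int) + 2) := by
        rw [hdim]; have : (((m:Nat):Int)) + ((n:Int) - ((m:Nat):Int)) + 2 = (n:Int) + 2 := by ring
        rw [this]
      rw [hdim']
      rw [hmk]
      unfold pvF; push_cast; ring
    · have hnd : ¬ PySem.Int.mod (((m:Nat):Int) - ((n:Int) - ((m:Nat):Int))) 3 = 0 := by
        rw [PySem.Int.mod_eq_zero_iff_dvd]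
        omega
      rw [List.foldl_cons, List.foldl_nil]
      unfold pvBody
      rw [if_neg hnd]
      have hcnt : pvCnt ((2*n) % 3) (m+1) = pvCnt ((2*n) % 3) m := by unfold pvCnt; omega
      rw [hcnt]
      exact ih (by omega)

-- ===== VERDICT (by name: the statement is the Claim_ definition above) =====
theorem s5_z3_invariant_spec : Claim_equal_s5_z3_invariant := by
  intro ell _
  unfold Spec_s5_z3_invariant s5_z3_invariant s5_z3_invariant_alt
  by_cases hneg : ell < 0
  · rw [if_pos hneg, PySem.List.pyRange_one_eq_nil (by omega)]
    rfl
  · rw [if_neg hneg]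
    obtain ⟨n, rfl⟩ := Int.eq_ofNat_of_zero_le (not_lt.mp hneg)
    have hr : PySem.Int.mod (2 * ((n:Nat):Int)) 3 = (((2*n) % 3 : Nat) : Int) := by
      have h2 : (2 * ((n:Nat):Int)) = (((2*n : Nat)):Int) := by push_cast; ring
      rw [h2]
      exact_mod_cast PySem.Int.mod_natCast (2*n) 3
    have hA : (PySem.List.pyRange 0 ((n:Int) + 1) 1).foldl (pvBody (n:Int)) 0 = pvPartial n (n+1) := by
      unfold pvPartial; push_cast; rfl
    rw [hA]
    dsimp only
    rw [hr]
    have hJ1 : PySem.Int.floordiv ((n:Int) - (((2*n) % 3 : Nat):Int)) 3 + 1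
        = ((pvCnt ((2*n) % 3) (n+1) : Nat) : Int) := by
      rw [PySem.Int.floordiv_eq_ediv_of_pos (by norm_num)]
      unfold pvCnt
      omega
    have key : ((n:Int) + 2) *
        (2 * (PySem.Int.floordiv ((n:Int) - (((2*n) % 3 : Nat):Int)) 3 + 1) * ((((2*n) % 3 : Nat):Int) + 1) * ((n:Int) - (((2*n) % 3 : Nat):Int) + 1)
          + 3 * (((n:Int) - (((2*n) % 3 : Nat):Int) + 1) - ((((2*n) % 3 : Nat):Int) + 1)) * (PySem.Int.floordiv ((n:Int) - (((2*n) % 3 : Nat):Int)) 3)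
              * (PySem.Int.floordiv ((n:Int) - (((2*n) % 3 : Nat):Int)) 3 + 1)
          - 3 * (PySem.Int.floordiv ((n:Int) - (((2*n) % 3 : Nat):Int)) 3) * (PySem.Int.floordiv ((n:Int) - (((2*n) % 3 : Nat):Int)) 3 + 1)
              * (2 * (PySem.Int.floordiv ((n:Int) - (((2*n) % 3 : Nat):Int)) 3) + 1))
        = 4 * pvPartial n (n+1) := by
      have hF : ((n:Int) + 2) *
          (2 * (PySem.Int.floordiv ((n:Int) - (((2*n) % 3 : Nat):Int)) 3 + 1) * ((((2*n) % 3 : Nat):Int) + 1) * ((n:Int) - (((2*n) % 3 : Nat):Int) + 1)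
            + 3 * (((n:Int) - (((2*n) % 3 : Nat):Int) + 1) - ((((2*n) % 3 : Nat):Int) + 1)) * (PySem.Int.floordiv ((n:Int) - (((2*n) % 3 : Nat):Int)) 3)
                * (PySem.Int.floordiv ((n:Int) - (((2*n) % 3 : Nat):Int)) 3 + 1)
            - 3 * (PySem.Int.floordiv ((n:Int) - (((2*n) % 3 : Nat):Int)) 3) * (PySem.Int.floordiv ((n:Int) - (((2*n) % 3 : Nat):Int)) 3 + 1)
                * (2 * (PySem.Int.floordiv ((n:Int) - (((2*n) % 3 : Nat):Int)) 3) + 1))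
          = pvF n ((2*n) % 3) (PySem.Int.floordiv ((n:Int) - (((2*n) % 3 : Nat):Int)) 3 + 1) := by
        unfold pvF; ring
      rw [hF, hJ1]
      exact (pv_partial_eq n (n+1) le_rfl).symm
    rw [key]
    rw [PySem.Int.floordiv_eq_ediv_of_pos (by norm_num)]
    exact (Int.mul_ediv_cancel_left _ (by norm_num)).symm
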